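-- pv_equiv track=rewrite | github.com/SykoDev18/MapStar | routing.py | concatenate_routes
-- ===== SOURCE A (Python) =====
-- from typing import Callable, Dict, Iterable, List, Optional, Tuple
--
-- def concatenate_routes(routes: List[List[int]]) -> List[int]:
--     """Merge multiple node routes into a single continuous list without duplicates."""
--     merged: List[int] = []
--     for segment in routes:
--         if not segment:
--             continue
--         if not merged:
--             merged.extend(segment)
--         else:
--             merged.extend(segment[1:])
--     return merged
-- ===== SOURCE B (Python) =====
-- def concatenate_routes(routes):
--     """Merge multiple node routes into a single continuous list without duplicates."""
--     heads = [s[0] for s in routes if s]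
--     if not heads:
--         return []
--     tails = [x for s in routes if s for x in s[1:]]
--     return heads[:1] + tails
-- ===== Notes on version B (the rewrite author's own statement) =====
-- stated objective: alternative
-- what changed: Replaces A's accumulator loop with an 'is merged still empty' flag by a closed-form concatenation: one head element (of the first non-empty segment) plus the tails of ALL non-empty segments, treating every segment uniformly instead of special-casing the first whole segment.
import Mathlib
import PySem

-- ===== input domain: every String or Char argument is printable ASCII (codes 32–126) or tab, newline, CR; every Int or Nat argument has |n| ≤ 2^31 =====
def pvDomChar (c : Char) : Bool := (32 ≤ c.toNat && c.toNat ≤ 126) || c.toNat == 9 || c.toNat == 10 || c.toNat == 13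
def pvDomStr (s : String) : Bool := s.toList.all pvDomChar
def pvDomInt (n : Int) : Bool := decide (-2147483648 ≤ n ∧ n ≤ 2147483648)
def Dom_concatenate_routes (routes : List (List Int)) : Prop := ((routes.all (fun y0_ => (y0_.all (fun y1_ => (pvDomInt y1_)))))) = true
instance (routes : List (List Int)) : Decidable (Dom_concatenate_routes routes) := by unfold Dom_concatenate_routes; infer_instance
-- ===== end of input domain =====

-- B replaces A's accumulator loop (with its 'merged still empty' flag) by a closed-form concatenation: one head element plus the tails of all non-empty segments (objective: alternative).


-- ===== PORT A =====
-- segment[1:] is ported as List.drop 1 (exact for a nonnegative literal slice start)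
def concatenate_routes (routes : List (List Int)) : List Int :=
  routes.foldl
    (fun merged segment =>
      if segment.isEmpty then merged
      else if merged.isEmpty then merged ++ segment
      else merged ++ segment.drop 1)
    []

-- ===== PORT B =====
-- s[0] under the comprehension's 'if s' guard is ported as headI (exact on non-empty lists)
def concatenate_routes_alt (routes : List (List Int)) : List Int :=
  let heads := (routes.filter (fun s => !s.isEmpty)).map (fun s => s.headI)
  if heads.isEmpty then []
  else
    let tails := (routes.filter (fun s => !s.isEmpty)).flatMap (fun s => s.drop 1)
    heads.take 1 ++ tails

-- ===== PRECONDITION & SPEC =====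
def Spec_concatenate_routes (routes : List (List Int)) (out : List Int) : Prop := out = concatenate_routes_alt routes
instance (routes : List (List Int)) (out : List Int) : Decidable (Spec_concatenate_routes routes out) := by unfold Spec_concatenate_routes; infer_instance

-- ===== CLAIM (what is proved, stated in full; the proofs are below) =====
def Claim_equal_concatenate_routes : Prop := ∀ (routes : List (List Int)), Dom_concatenate_routes routes → Spec_concatenate_routes routes (concatenate_routes routes)

-- ===== LEMMAS AND PROOFS =====

-- A's loop, once the accumulator is non-empty, only ever appends tails of non-empty segments
theorem concat_loopA_ne (rs : List (List Int)) (m : List Int) (hm : m ≠ []) :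
    rs.foldl
      (fun merged segment =>
        if segment.isEmpty then merged
        else if merged.isEmpty then merged ++ segment
        else merged ++ segment.drop 1) m
      = m ++ (rs.filter (fun s => !s.isEmpty)).flatMap (fun s => s.drop 1) := by
  induction rs generalizing m with
  | nil => simp
  | cons s rs ih =>
    by_cases hs : s = []
    · subst hs; simpa using ih m hm
    · have hse : s.isEmpty = false := by simp [hs]
      have hne : m ++ s.drop 1 ≠ [] := fun h => hm (List.append_eq_nil_iff.mp h).1
      have hme : m.isEmpty = false := by simp [hm]
      rw [List.foldl_cons]
      simp only [hse, hme, Bool.false_eq_true, if_false]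
      rw [ih _ hne]
      simp [hse]

theorem concatenate_routes_eq (routes : List (List Int)) :
    concatenate_routes routes = concatenate_routes_alt routes := by
  induction routes with
  | nil => rfl
  | cons s rs ih =>
    by_cases hs : s = []
    · subst hs
      simpa [concatenate_routes, concatenate_routes_alt] using ih
    · have hse : s.isEmpty = false := by simp [hs]
      obtain ⟨h, t, rfl⟩ := List.exists_cons_of_ne_nil hs
      simp only [concatenate_routes, concatenate_routes_alt, List.foldl_cons, hse,
        Bool.false_eq_true, if_false, List.isEmpty_nil, if_true, List.nil_append,
        List.filter_cons, Bool.not_false]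
      rw [concat_loopA_ne rs (h :: t) hs]
      simp [List.headI]

-- ===== VERDICT (by name: the statement is the Claim_ definition above) =====
theorem concatenate_routes_spec : Claim_equal_concatenate_routes := by
  intro routes _
  exact concatenate_routes_eq routes
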